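-- pv_equiv track=rewrite | github.com/pypi-data/pypi-mirror-3 | packages/extended_range/extended_range-1.0.1.tar.gz/extended_range-1.0.1/extended_range.py | range_ext
-- ===== SOURCE A (Python) =====
-- def range_ext(start=0, stop=None, steps=1, reps=1):
-- #'reversed_range_list' is the variable that contains the list the function produces.
-- 	reversed_range_list=[]
-- #This part ensures that the first argument is taken as the stop value if no second argument is provided.
-- 	if stop==None:
-- 		start_mod=0
-- 		stop_mod=start
-- #This part is to ensure that if stop value is less than start value, the list is produced accordingly i.e. in a descending order.
-- 	elif start>stop:
-- 		start_mod=stop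
-- 		stop_mod=start
-- 	else:
-- 		start_mod=start
-- 		stop_mod=stop
-- 	for number in range(start_mod, stop_mod, steps):
-- 		reversed_range_list=[number]*reps+reversed_range_list
-- 	if stop==None:
-- #The list comes out in descending order. So we just need to reverse it.
-- 		list.reverse(reversed_range_list)
-- 	elif start<stop:
-- 		list.reverse(reversed_range_list)
-- #If start value is greater than stop value, then the list is already in the order we want.
-- 	return(reversed_range_list)
-- ===== SOURCE B (Python) =====
-- def range_ext(start=0, stop=None, steps=1, reps=1):
--     # Normalise endpoints exactly as the docstring describes.
--     if stop is None:
--         lo, hi = 0, start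
--     elif start > stop:
--         lo, hi = stop, start
--     else:
--         lo, hi = start, stop
--     n = len(range(lo, hi, steps))
--     descending = stop is not None and start > stop
--     if reps <= 0:
--         return []
--     # Build the result directly in its final order: a counted walk that
--     # starts at the end of the range when the output must descend.
--     v = lo + (n - 1) * steps if descending else lo
--     step = -steps if descending else steps
--     out = []
--     for _ in range(n):
--         out += [v] * reps
--         v += step
--     return out
-- ===== Notes on version B (the rewrite author's own statement) =====
-- stated objective: alternative
-- what changed: B computes the range length once and then emits the repeat-blocks directly in their final order with a single counted walk (starting from the range's last element and stepping by -steps when the output must descend), instead of A's loop that prepends a [number]*reps block per range element and then conditionally reverses the whole list.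
import Mathlib
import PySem

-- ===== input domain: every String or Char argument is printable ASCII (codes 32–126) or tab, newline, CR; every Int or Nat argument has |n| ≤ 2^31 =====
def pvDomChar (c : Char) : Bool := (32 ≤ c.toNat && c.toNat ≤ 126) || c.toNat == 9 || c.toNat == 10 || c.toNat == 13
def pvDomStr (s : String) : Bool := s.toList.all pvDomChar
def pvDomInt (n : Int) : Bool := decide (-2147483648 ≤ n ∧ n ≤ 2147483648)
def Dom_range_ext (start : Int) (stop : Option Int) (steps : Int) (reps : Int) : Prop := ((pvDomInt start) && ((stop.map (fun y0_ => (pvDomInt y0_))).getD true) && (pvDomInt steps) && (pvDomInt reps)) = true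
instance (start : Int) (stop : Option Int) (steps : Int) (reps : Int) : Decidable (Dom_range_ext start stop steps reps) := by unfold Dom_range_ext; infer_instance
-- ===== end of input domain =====

-- B builds the result directly in its final order by a counted walk (starting at the
-- range's last element when the output must descend), instead of A's block-prepending
-- loop followed by a conditional reverse; return values agree on steps ≠ 0.

-- ===== PORT A =====
def range_ext (start : Int) (stop : Option Int) (steps : Int) (reps : Int) : List Int :=
  -- start_mod / stop_mod branch logic of A
  let sm : Int × Int :=
    match stop with
    | none => (0, start)
    | some st => if start > st then (st, start) else (start, st)
  -- 'for number in range(...): reversed_range_list = [number]*reps + reversed_range_list'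
  let reversed_range_list :=
    (PySem.List.pyRange sm.1 sm.2 steps).foldl
      (fun acc number => List.replicate reps.toNat number ++ acc) []
  match stop with
  | none => reversed_range_list.reverse
  | some st => if start < st then reversed_range_list.reverse else reversed_range_list

-- ===== PORT B =====
def range_ext_alt (start : Int) (stop : Option Int) (steps : Int) (reps : Int) : List Int :=
  let p : Int × Int :=
    match stop with
    | none => (0, start)
    | some st => if start > st then (st, start) else (start, st)
  -- n = len(range(lo, hi, steps))
  let n : Nat := (PySem.List.pyRange p.1 p.2 steps).length
  let descending : Bool :=
    match stop with
    | none => false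
    | some st => decide (start > st)
  if reps ≤ 0 then []
  else
    let v0 : Int := if descending then p.1 + ((n : Int) - 1) * steps else p.1
    let step : Int := if descending then -steps else steps
    -- 'for _ in range(n): out += [v]*reps; v += step'
    ((List.range n).foldl
        (fun (s : List Int × Int) (_ : Nat) =>
          (s.1 ++ List.replicate reps.toNat s.2, s.2 + step))
        ([], v0)).1

-- ===== PRECONDITION & SPEC =====
-- steps = 0 makes Python's range(...) raise ValueError in both programs.
def Pre_range_ext (start : Int) (stop : Option Int) (steps : Int) (reps : Int) : Prop := steps ≠ 0
instance (start : Int) (stop : Option Int) (steps : Int) (reps : Int) : Decidable (Pre_range_ext start stop steps reps) := by unfold Pre_range_ext; infer_instance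

def pvWitness_range_ext : Int × Option Int × Int × Int := (2, some 9, 2, 3)

def Spec_range_ext (start : Int) (stop : Option Int) (steps : Int) (reps : Int) (out : List Int) : Prop := out = range_ext_alt start stop steps reps
instance (start : Int) (stop : Option Int) (steps : Int) (reps : Int) (out : List Int) : Decidable (Spec_range_ext start stop steps reps out) := by unfold Spec_range_ext; infer_instance

-- ===== CLAIM (what is proved, stated in full; the proofs are below) =====
def Claim_equal_range_ext : Prop := ∀ (start : Int) (stop : Option Int) (steps : Int) (reps : Int), Dom_range_ext start stop steps reps → Pre_range_ext start stop steps reps → Spec_range_ext start stop steps reps (range_ext start stop steps reps)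

-- ===== LEMMAS AND PROOFS =====

-- A's prepending loop builds the reverse of the block-concatenation.
theorem foldl_prepend_replicate (rn : Nat) (l : List Int) (init : List Int) :
    l.foldl (fun acc number => List.replicate rn number ++ acc) init
      = (l.flatMap (fun n => List.replicate rn n)).reverse ++ init := by
  induction l generalizing init with
  | nil => simp
  | cons x xs ih => simp [ih, List.reverse_append]

-- pyRange with nonzero step is an affine image of a Nat range of its own length.
theorem pyRange_closed (a b s : Int) (hs : s ≠ 0) :
    PySem.List.pyRange a b s
      = (List.range (PySem.List.pyRange a b s).length).map (fun k : Nat => a + s * k) := by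
  simp only [PySem.List.pyRange, if_neg hs, List.length_map, List.length_range]

-- B's counted walk accumulates the blocks of an affine progression.
theorem foldl_emit (r : Nat) (step : Int) :
    ∀ (n : Nat) (acc : List Int) (v : Int),
      (List.range n).foldl
          (fun (s : List Int × Int) (_ : Nat) => (s.1 ++ List.replicate r s.2, s.2 + step))
          (acc, v)
        = (acc ++ (List.range n).flatMap (fun k : Nat => List.replicate r (v + step * k)),
           v + step * n) := by
  intro n
  induction n with
  | zero => intro acc v; simp
  | succ n ih =>
    intro acc v
    rw [List.range_succ, List.foldl_append, ih]
    simp only [List.foldl_cons, List.foldl_nil, List.flatMap_append,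
      List.flatMap_cons, List.flatMap_nil, List.append_nil, List.append_assoc, Prod.mk.injEq]
    refine ⟨trivial, by push_cast; ring⟩

-- pointwise-equal block functions give the same flatMap
theorem flatMap_congr_mem {α β : Type} (l : List α) (f g : α → List β)
    (h : ∀ x ∈ l, f x = g x) : l.flatMap f = l.flatMap g := by
  induction l with
  | nil => rfl
  | cons x xs ih =>
    simp only [List.flatMap_cons, h x (by simp)]
    rw [ih (fun y hy => h y (by simp [hy]))]

-- emitting the blocks in reversed index order reverses the block list.
theorem flatMap_rev (r : Nat) (g : Nat → Int) :
    ∀ n : Nat, (List.range n).flatMap (fun k => List.replicate r (g (n - 1 - k)))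
      = ((List.range n).flatMap (fun k => List.replicate r (g k))).reverse := by
  intro n
  induction n with
  | zero => simp
  | succ n ih =>
    conv_rhs => rw [List.range_succ]
    rw [List.range_succ_eq_map, List.flatMap_cons, List.flatMap_map]
    simp only [Nat.succ_eq_add_one]
    have h1 : ∀ k ∈ List.range n,
        (fun a : Nat => List.replicate r (g (n + 1 - 1 - (a + 1)))) k
          = (fun k : Nat => List.replicate r (g (n - 1 - k))) k := by
      intro k _
      simp only []
      congr 2
      omega
    rw [flatMap_congr_mem _ _ _ h1, ih]
    have e0 : n + 1 - 1 - 0 = n := by omega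
    rw [e0]
    simp [List.reverse_append]

-- the ascending walk is exactly the flatMap of replicate blocks over pyRange
theorem B_asc (lo hi s : Int) (r : Nat) (hs : s ≠ 0) :
    ((List.range (PySem.List.pyRange lo hi s).length).foldl
        (fun (st : List Int × Int) (_ : Nat) => (st.1 ++ List.replicate r st.2, st.2 + s))
        ([], lo)).1
      = (PySem.List.pyRange lo hi s).flatMap (List.replicate r) := by
  rw [foldl_emit]
  conv_rhs => rw [pyRange_closed lo hi s hs]
  simp [List.flatMap_map]

-- the descending walk is the reverse of that flatMap
theorem B_desc (lo hi s : Int) (r : Nat) (hs : s ≠ 0) :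
    ((List.range (PySem.List.pyRange lo hi s).length).foldl
        (fun (st : List Int × Int) (_ : Nat) => (st.1 ++ List.replicate r st.2, st.2 + -s))
        ([], lo + (((PySem.List.pyRange lo hi s).length : Int) - 1) * s)).1
      = ((PySem.List.pyRange lo hi s).flatMap (List.replicate r)).reverse := by
  rw [foldl_emit]
  conv_rhs => rw [pyRange_closed lo hi s hs]
  rw [List.flatMap_map]
  set n := (PySem.List.pyRange lo hi s).length with hn
  simp only [List.nil_append]
  have h1 : ∀ k ∈ List.range n,
      (fun k : Nat => List.replicate r (lo + ((n : Int) - 1) * s + -s * k)) k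
        = (fun k : Nat => List.replicate r ((fun j : Nat => lo + s * j) (n - 1 - k))) k := by
    intro k hk
    have hk' : k < n := List.mem_range.mp hk
    simp only []
    congr 1
    have : ((n - 1 - k : Nat) : Int) = (n : Int) - 1 - k := by omega
    rw [this]; ring
  rw [flatMap_congr_mem _ _ _ h1, flatMap_rev r (fun j : Nat => lo + s * j) n]

-- range(a, a, s) is empty
theorem pyRange_self (a s : Int) : PySem.List.pyRange a a s = [] := by
  simp [PySem.List.pyRange]

-- A's returned list equals B's for every nonzero step.
theorem range_ext_eq (start : Int) (stop : Option Int) (steps : Int) (reps : Int)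
    (hs : steps ≠ 0) :
    range_ext start stop steps reps = range_ext_alt start stop steps reps := by
  unfold range_ext range_ext_alt
  cases stop with
  | none =>
    simp only
    rw [foldl_prepend_replicate]
    by_cases hr : reps ≤ 0
    · have h0 : reps.toNat = 0 := by omega
      simp [hr, h0]
    · simp only [if_neg hr]
      simp only [Bool.false_eq_true, if_false]
      rw [B_asc 0 start steps reps.toNat hs]
      simp
  | some st =>
    simp only
    by_cases h : start > st
    · have hd : decide (start > st) = true := by simpa using h
      have hlt : ¬ start < st := by omega
      simp only [if_pos h, hd, if_neg hlt]
      rw [foldl_prepend_replicate, List.append_nil]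
      by_cases hr : reps ≤ 0
      · have h0 : reps.toNat = 0 := by omega
        simp [hr, h0]
      · simp only [if_neg hr, if_true]
        rw [B_desc st start steps reps.toNat hs]
    · have hd : decide (start > st) = false := by simpa using h
      simp only [if_neg h, hd]
      rw [foldl_prepend_replicate, List.append_nil]
      by_cases hr : reps ≤ 0
      · have h0 : reps.toNat = 0 := by omega
        by_cases h2 : start < st <;> simp [hr, h2, h0]
      · simp only [if_neg hr, Bool.false_eq_true, if_false]
        rw [B_asc start st steps reps.toNat hs]
        by_cases h2 : start < st
        · simp [h2]
        · have heq : start = st := by omega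
          subst heq
          simp [pyRange_self]

-- ===== VERDICT (by name: the statement is the Claim_ definition above) =====
theorem range_ext_spec : Claim_equal_range_ext := by
  intro start stop steps reps _ hpre
  unfold Spec_range_ext
  exact range_ext_eq start stop steps reps hpre
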